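-- pv_equiv track=rewrite | github.com/Tanmay53/cohort_3 | submissions/sm_012_gaurav/week_13/day_5/session_1/pyramid_play.py | rhombus
-- ===== SOURCE A (Python) =====
-- def pyramid(n):
--     s = ''
--     for i in range(n):
--         s += '.'*(n - i)
--         s += '0.'*(i+1)
--         s += '.'*(n - i - 1)
--         s += '\n'
--     return s[:-1]
--
-- def rhombus(n):
--     s = ''
--     s += pyramid(n)+'\n'
--     for i in range(n - 1, -1, -1):
--         if i != n - 1:
--             s += '.'*(n - i)
--             s += '0.'*(i+1)
--             s += '.'*(n - i - 1)
--             s += '\n'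
--     return s[:-1]
-- ===== SOURCE B (Python) =====
-- def rhombus(n):
--     # grid construction: each row is a mutable buffer of 2n+1 dots; the '0's of
--     # row i are written in one strided slice assignment at columns n-i..n+i step 2.
--     # Rows 0..n-1 are built once; the bottom half reuses them mirrored.
--     width = 2 * n + 1
--     rows = []
--     for i in range(n):
--         cells = ['.'] * width
--         cells[n - i:n + i + 1:2] = ['0'] * (i + 1)
--         rows.append(''.join(cells))
--     return '\n'.join(rows + rows[:-1][::-1])
-- ===== Notes on version B (the rewrite author's own statement) =====
-- stated objective: alternative
-- what changed: Replaced the pyramid helper plus two block-concatenation loops ('.'*k + '0.'*m substrings, each chopped with s[:-1]) by a mutable-buffer grid construction: each row starts as 2n+1 dots, its '0's are written by one strided slice assignment at columns n-i..n+i step 2, each distinct row is computed once and the bottom half reuses the row list mirrored.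
import Mathlib
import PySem

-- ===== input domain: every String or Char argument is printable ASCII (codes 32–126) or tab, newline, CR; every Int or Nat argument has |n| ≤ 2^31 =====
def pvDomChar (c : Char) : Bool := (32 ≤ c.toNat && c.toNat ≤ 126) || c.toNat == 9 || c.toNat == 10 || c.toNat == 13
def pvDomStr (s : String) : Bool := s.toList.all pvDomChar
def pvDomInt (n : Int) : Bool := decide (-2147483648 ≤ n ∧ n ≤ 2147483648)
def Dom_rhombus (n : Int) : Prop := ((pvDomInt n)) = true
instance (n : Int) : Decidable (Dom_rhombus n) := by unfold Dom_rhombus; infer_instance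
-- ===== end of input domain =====

-- B builds each row as a mutable buffer of 2n+1 dots written by one strided slice
-- assignment, computes each distinct row once and mirrors the row list for the bottom
-- half, instead of concatenating repeated substring blocks twice (objective: alternative).

-- ===== PORT A =====
-- helper 'pyramid' of A, ported at the List Char level (PySem string ops are exact there);
-- s += … becomes a foldl over range(n); s[:-1] is PySem.List.slice _ none (some (-1))
def pyramid (n : Int) : List Char :=
  let s : List Char := (PySem.List.pyRange 0 n 1).foldl
    (fun s i => s ++ PySem.List.pyRepeat ['.'] (n - i)
                  ++ PySem.List.pyRepeat ['0', '.'] (i + 1)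
                  ++ PySem.List.pyRepeat ['.'] (n - i - 1)
                  ++ ['\n']) []
  PySem.List.slice s none (some (-1))

def rhombus (n : Int) : String :=
  let s : List Char := [] ++ (pyramid n ++ ['\n'])
  let s : List Char := (PySem.List.pyRange (n - 1) (-1) (-1)).foldl
    (fun s i => if i ≠ n - 1 then
                  s ++ PySem.List.pyRepeat ['.'] (n - i)
                    ++ PySem.List.pyRepeat ['0', '.'] (i + 1)
                    ++ PySem.List.pyRepeat ['.'] (n - i - 1)
                    ++ ['\n']
                else s) s
  String.ofList (PySem.List.slice s none (some (-1)))

-- ===== PORT B =====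
-- hand port of the strided slice assignment cells[a:a+2*len(vals):2] = vals, exact here
-- because in B the slice is always in range and len(vals) equals the slice's length
def writeStride2 (cells : List Char) (a : Int) (vals : List Char) : List Char :=
  match vals with
  | [] => cells
  | v :: vs => writeStride2 (PySem.List.pySetD cells a v) (a + 2) vs

-- one loop iteration: ['.']*width, the strided write, ''.join
def rowB (n i : Int) : List Char :=
  writeStride2 (PySem.List.pyRepeat ['.'] (2 * n + 1)) (n - i)
    (PySem.List.pyRepeat ['0'] (i + 1))

-- rows[:-1] is slice none (some (-1)); [::-1] is slice? none none (-1), never none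
-- (step -1 ≠ 0), so .getD [] never fires
def rhombus_alt (n : Int) : String :=
  let rows := (PySem.List.pyRange 0 n 1).map (rowB n)
  String.ofList (PySem.Chars.join ['\n']
    (rows ++ ((PySem.List.slice? (PySem.List.slice rows none (some (-1)))
                none none (-1)).getD [])))

-- ===== PRECONDITION & SPEC =====
def Spec_rhombus (n : Int) (out : String) : Prop := out = rhombus_alt n
instance (n : Int) (out : String) : Decidable (Spec_rhombus n out) := by unfold Spec_rhombus; infer_instance

-- ===== CLAIM (what is proved, stated in full; the proofs are below) =====
def Claim_equal_rhombus : Prop := ∀ (n : Int), Dom_rhombus n → Spec_rhombus n (rhombus n)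

-- ===== LEMMAS AND PROOFS =====

-- A's block-built row: '.'*(n-i) + '0.'*(i+1) + '.'*(n-i-1)
def rowA (n i : Int) : List Char :=
  PySem.List.pyRepeat ['.'] (n - i)
    ++ PySem.List.pyRepeat ['0', '.'] (i + 1)
    ++ PySem.List.pyRepeat ['.'] (n - i - 1)

-- concatenating row ++ '\n' for each row is the '\n'-join plus one trailing '\n'
theorem flatten_rows_eq_join (rs : List (List Char)) (h : rs ≠ []) :
    (rs.map (· ++ ['\n'])).flatten = PySem.Chars.join ['\n'] rs ++ ['\n'] := by
  induction rs with
  | nil => exact absurd rfl h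
  | cons r rs ih =>
    cases rs with
    | nil => simp [PySem.Chars.join_singleton]
    | cons q t =>
      rw [PySem.Chars.join_cons_cons]
      simp only [List.map_cons, List.flatten_cons] at *
      rw [ih (by simp)]
      simp

-- join distributes over ++ when both halves are nonempty
theorem join_append (xs ys : List (List Char)) (hx : xs ≠ []) (hy : ys ≠ []) :
    PySem.Chars.join ['\n'] (xs ++ ys)
      = PySem.Chars.join ['\n'] xs ++ ['\n'] ++ PySem.Chars.join ['\n'] ys := by
  induction xs with
  | nil => exact absurd rfl hx
  | cons x xs ih =>
    cases xs with
    | nil =>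
      cases ys with
      | nil => exact absurd rfl hy
      | cons y t =>
        rw [List.singleton_append, PySem.Chars.join_cons_cons, PySem.Chars.join_singleton]
    | cons x' t =>
      rw [List.cons_append, List.cons_append, PySem.Chars.join_cons_cons,
          ← List.cons_append, PySem.Chars.join_cons_cons, ih (by simp)]
      simp

-- A's loop body is 'append the row then a newline'
theorem foldl_rows (L : List Int) (n : Int) (init : List Char) :
    L.foldl (fun s i => s ++ PySem.List.pyRepeat ['.'] (n - i)
                  ++ PySem.List.pyRepeat ['0', '.'] (i + 1)
                  ++ PySem.List.pyRepeat ['.'] (n - i - 1)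
                  ++ ['\n']) init
      = init ++ (L.map (fun i => rowA n i ++ ['\n'])).flatten := by
  have h : (fun (s : List Char) (i : Int) => s ++ PySem.List.pyRepeat ['.'] (n - i)
                  ++ PySem.List.pyRepeat ['0', '.'] (i + 1)
                  ++ PySem.List.pyRepeat ['.'] (n - i - 1)
                  ++ ['\n'])
         = fun s i => s ++ (rowA n i ++ ['\n']) := by
    funext s i; simp [rowA]
  rw [h, PySem.List.foldl_append_eq_flatMap (fun i => rowA n i ++ ['\n']) L init,
      List.flatMap_def]

-- A equals the '\n'-join of the block rows over the symmetric index list (0 < n)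
theorem rhombus_eq_joinA (n : Int) (hn : 0 < n) :
    rhombus n = String.ofList (PySem.Chars.join ['\n']
      ((PySem.List.pyRange 0 n 1 ++ PySem.List.pyRange (n - 2) (-1) (-1)).map (rowA n))) := by
  unfold rhombus pyramid
  have hR1 : PySem.List.pyRange 0 n 1 ≠ [] := by
    rw [PySem.List.pyRange_one_cons (by omega : (0:Int) < n)]; simp
  set R1 := PySem.List.pyRange 0 n 1 with hR1def
  set R2 := PySem.List.pyRange (n - 2) (-1) (-1) with hR2def
  have hmap1 : List.map (fun i => rowA n i ++ ['\n']) R1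
      = (R1.map (rowA n)).map (· ++ ['\n']) := by simp
  rw [foldl_rows, List.nil_append, hmap1,
      flatten_rows_eq_join _ (by simpa using hR1),
      PySem.List.slice_to_neg_one]
  simp only [List.nil_append]
  rw [List.dropLast_concat]
  -- peel i = n-1 off the countdown loop (its branch does nothing), then drop the if
  rw [PySem.List.pyRange_neg_one_cons (by omega : (-1:Int) < n - 1), List.foldl_cons,
      if_neg (by simp)]
  have hstep : ((n:Int) - 1 - 1) = n - 2 := by ring
  rw [hstep, ← hR2def]
  rw [PySem.List.foldl_congr_mem R2 _
      (fun s i => s ++ PySem.List.pyRepeat ['.'] (n - i)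
                ++ PySem.List.pyRepeat ['0', '.'] (i + 1)
                ++ PySem.List.pyRepeat ['.'] (n - i - 1)
                ++ ['\n']) _
      (by
        intro acc x hx
        rw [hR2def, PySem.List.mem_pyRange_neg_one] at hx
        rw [if_pos (by omega)]),
      foldl_rows]
  have hmap2 : List.map (fun i => rowA n i ++ ['\n']) R2
      = (R2.map (rowA n)).map (· ++ ['\n']) := by simp
  rw [hmap2]
  by_cases h2 : n = 1
  · subst h2
    have : R2 = [] := PySem.List.pyRange_neg_one_eq_nil (by omega)
    rw [this]
    simp [PySem.List.slice_to_neg_one]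
  · have hR2 : R2 ≠ [] := by
      intro hc
      have : (n - 2 : Int) ∈ R2 := by
        rw [hR2def, PySem.List.mem_pyRange_neg_one]; omega
      rw [hc] at this; exact absurd this (List.not_mem_nil)
    rw [flatten_rows_eq_join _ (by simpa using hR2), List.map_append]
    rw [join_append _ _ (by simpa using hR1) (by simpa using hR2)]
    rw [PySem.List.slice_to_neg_one]
    have : PySem.Chars.join ['\n'] (R1.map (rowA n)) ++ ['\n'] ++
            (PySem.Chars.join ['\n'] (R2.map (rowA n)) ++ ['\n'])
         = (PySem.Chars.join ['\n'] (R1.map (rowA n)) ++ ['\n'] ++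
            PySem.Chars.join ['\n'] (R2.map (rowA n))) ++ ['\n'] := by simp
    rw [this, List.dropLast_concat]

-- the alternating middle of a row: 2m+1 cells '0','.','0',…,'0'
def altX : Nat → List Char
  | 0 => ['0']
  | m + 1 => '0' :: '.' :: altX m

-- altX m plus the closing '.' is exactly '0.'*(m+1)
theorem altX_append_dot (m : Nat) :
    altX m ++ ['.'] = (List.replicate (m + 1) (['0', '.'] : List Char)).flatten := by
  induction m with
  | zero => rfl
  | succ m ih =>
    rw [List.replicate_succ, List.flatten_cons, ← ih]
    simp [altX]

-- a strided write past an untouched head cell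
theorem writeStride2_cons (c : Char) (cs vs : List Char) (a : Int) (ha : 0 ≤ a) :
    writeStride2 (c :: cs) (a + 1) vs = c :: writeStride2 cs a vs := by
  induction vs generalizing c cs a with
  | nil => rfl
  | cons v vs ih =>
    show writeStride2 (PySem.List.pySetD (c :: cs) (a + 1) v) (a + 1 + 2) vs
       = c :: writeStride2 (PySem.List.pySetD cs a v) (a + 2) vs
    rw [PySem.List.pySetD_of_nonneg _ _ (by omega), PySem.List.pySetD_of_nonneg _ _ ha,
        show (a + 1).toNat = a.toNat + 1 by omega, List.set_cons_succ,
        show a + 1 + 2 = (a + 2) + 1 by ring]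
    exact ih _ _ _ (by omega)

-- a strided write past an untouched replicate prefix
theorem writeStride2_prefix (p : Nat) (rest vs : List Char) :
    writeStride2 (List.replicate p '.' ++ rest) (p : Int) vs
      = List.replicate p '.' ++ writeStride2 rest 0 vs := by
  induction p generalizing rest with
  | zero => simp
  | succ p ih =>
    rw [List.replicate_succ, List.cons_append,
        show ((p + 1 : Nat) : Int) = (p : Int) + 1 by push_cast; ring,
        writeStride2_cons _ _ _ _ (by positivity), ih]
    simp

-- writing m+1 zeros with stride 2 into 2m+1 dots yields the alternating block
theorem writeStride2_zeros (m : Nat) (tail : List Char) :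
    writeStride2 (List.replicate (2 * m + 1) '.' ++ tail) 0 (List.replicate (m + 1) '0')
      = altX m ++ tail := by
  induction m generalizing tail with
  | zero =>
    show writeStride2 (PySem.List.pySetD ('.' :: tail) 0 '0') 2 [] = '0' :: tail
    rw [PySem.List.pySetD_of_nonneg _ _ (by omega)]
    rfl
  | succ m ih =>
    rw [show 2 * (m + 1) + 1 = (2 * m + 1) + 1 + 1 by omega,
        List.replicate_succ, List.replicate_succ (n := 2 * m + 1),
        List.replicate_succ (n := m + 1), List.cons_append, List.cons_append]
    show writeStride2
        (PySem.List.pySetD ('.' :: '.' :: (List.replicate (2 * m + 1) '.' ++ tail)) 0 '0')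
        2 (List.replicate (m + 1) '0') = altX (m + 1) ++ tail
    rw [PySem.List.pySetD_of_nonneg _ _ (by omega)]
    show writeStride2 ('0' :: '.' :: (List.replicate (2 * m + 1) '.' ++ tail))
        2 (List.replicate (m + 1) '0') = altX (m + 1) ++ tail
    rw [show (2 : Int) = 1 + 1 by norm_num, writeStride2_cons _ _ _ _ (by omega),
        show (1 : Int) = 0 + 1 by norm_num, writeStride2_cons _ _ _ _ (by omega), ih]
    rfl

-- for 0 ≤ i < n, B's buffer row equals A's block row
theorem rowB_eq_rowA (n i : Int) (h0 : 0 ≤ i) (hi : i < n) : rowB n i = rowA n i := by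
  obtain ⟨I, hI⟩ : ∃ I : Nat, i = (I : Int) := ⟨i.toNat, by omega⟩
  obtain ⟨P, hP⟩ : ∃ P : Nat, n - i = (P : Int) ∧ 1 ≤ P := ⟨(n - i).toNat, by omega, by omega⟩
  obtain ⟨hP, hP1⟩ := hP
  unfold rowB rowA
  rw [PySem.List.pyRepeat_singleton, PySem.List.pyRepeat_singleton,
      PySem.List.pyRepeat_singleton, PySem.List.pyRepeat_singleton, PySem.List.pyRepeat,
      show n - i - 1 = ((P - 1 : Nat) : Int) by omega,
      show n - i = (P : Int) from hP,
      show (2 * n + 1).toNat = P + ((2 * I + 1) + P) by omega,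
      show (i + 1).toNat = I + 1 by omega,
      Int.toNat_natCast, Int.toNat_natCast,
      List.replicate_add, List.replicate_add,
      writeStride2_prefix, writeStride2_zeros, ← altX_append_dot,
      show P = (P - 1) + 1 by omega, List.replicate_succ]
  simp

-- B equals the same join over the same rows (0 < n)
theorem rhombus_alt_eq_joinA (n : Int) (hn : 0 < n) :
    rhombus_alt n = String.ofList (PySem.Chars.join ['\n']
      ((PySem.List.pyRange 0 n 1 ++ PySem.List.pyRange (n - 2) (-1) (-1)).map (rowA n))) := by
  simp only [rhombus_alt]
  rw [PySem.List.slice_to_neg_one, PySem.List.slice?_none_none_neg_one, Option.getD_some]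
  have hrows : (PySem.List.pyRange 0 n 1).map (rowB n)
      = (PySem.List.pyRange 0 n 1).map (rowA n) := by
    apply List.map_congr_left
    intro i hi
    rw [PySem.List.mem_pyRange_one] at hi
    exact rowB_eq_rowA n i hi.1 hi.2
  rw [hrows, ← List.map_dropLast]
  have h5 : PySem.List.pyRange 0 n 1 = PySem.List.pyRange 0 (n - 1) 1 ++ [n - 1] := by
    have h := PySem.List.pyRange_one_succ_right (a := 0) (b := n - 1) (by omega)
    rw [show n - 1 + 1 = n by ring] at h
    exact h
  have h6 := PySem.List.pyRange_neg_one_eq_reverse (n - 2) (-1)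
  rw [show (-1 : Int) + 1 = 0 by norm_num, show n - 2 + 1 = n - 1 by ring] at h6
  rw [h5, List.dropLast_concat, ← List.map_reverse, ← h6]
  simp [List.map_append]

-- ===== VERDICT (by name: the statement is the Claim_ definition above) =====
theorem rhombus_spec : Claim_equal_rhombus := by
  intro n _
  unfold Spec_rhombus
  by_cases hn : n ≤ 0
  · unfold rhombus rhombus_alt pyramid
    rw [PySem.List.pyRange_one_eq_nil hn,
        PySem.List.pyRange_neg_one_eq_nil (by omega : n - 1 ≤ -1)]
    simp [PySem.List.slice_to_neg_one, PySem.Chars.join_nil,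
          PySem.List.slice?_none_none_neg_one]
  · rw [rhombus_eq_joinA n (by omega), rhombus_alt_eq_joinA n (by omega)]
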